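-- pv_equiv track=rewrite | github.com/brass75/AdventOfCode | aoc_2024/day15.py | get_vertical_move_coordinates
-- ===== SOURCE A (Python) =====
-- def get_vertical_move_coordinates(dy: int, grid: dict, points: set) -> set:
--     """Figure out which points contain a box"""
--     if all(grid.get((x, y + dy)) == '.' for x, y in points):
--         return points
--
--     next_row = set()
--
--     for x, y in points:
--         if (adj := grid.get((x, y + dy))) == '[':
--             next_row.update([(x, y + dy), (x + 1, y + dy)])
--         elif adj == ']':
--             next_row.update([(x, y + dy), (x - 1, y + dy)])
--
--     return points | get_vertical_move_coordinates(dy, grid, next_row)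
-- ===== SOURCE B (Python) =====
-- def get_vertical_move_coordinates(dy: int, grid: dict, points: set) -> set:
--     """Figure out which points contain a box.
--
--     Worklist BFS: a single queue of individual cells with a visited set,
--     instead of level-by-level recursion over whole frontiers.
--     """
--     seen = set()
--     queue = list(points)
--     i = 0
--     while i < len(queue):
--         p = queue[i]
--         i += 1
--         if p in seen:
--             continue
--         seen.add(p)
--         x, y = p
--         adj = grid.get((x, y + dy))
--         if adj == '[':
--             queue.append((x, y + dy))
--             queue.append((x + 1, y + dy))
--         elif adj == ']':
--             queue.append((x, y + dy))
--             queue.append((x - 1, y + dy))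
--     return seen
-- ===== Notes on version B (the rewrite author's own statement) =====
-- stated objective: alternative
-- what changed: A's level-by-level recursion (build a whole next frontier set, recurse, union on the way back) is replaced by a worklist BFS: one queue of individual cells with a visited set, each cell expanded at most once.
-- outside the precondition, e.g. on get_vertical_move_coordinates(0, {}, {(1, 1)}): A returns {(1, 1)}, B returns {(1, 1)}
import Mathlib
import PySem

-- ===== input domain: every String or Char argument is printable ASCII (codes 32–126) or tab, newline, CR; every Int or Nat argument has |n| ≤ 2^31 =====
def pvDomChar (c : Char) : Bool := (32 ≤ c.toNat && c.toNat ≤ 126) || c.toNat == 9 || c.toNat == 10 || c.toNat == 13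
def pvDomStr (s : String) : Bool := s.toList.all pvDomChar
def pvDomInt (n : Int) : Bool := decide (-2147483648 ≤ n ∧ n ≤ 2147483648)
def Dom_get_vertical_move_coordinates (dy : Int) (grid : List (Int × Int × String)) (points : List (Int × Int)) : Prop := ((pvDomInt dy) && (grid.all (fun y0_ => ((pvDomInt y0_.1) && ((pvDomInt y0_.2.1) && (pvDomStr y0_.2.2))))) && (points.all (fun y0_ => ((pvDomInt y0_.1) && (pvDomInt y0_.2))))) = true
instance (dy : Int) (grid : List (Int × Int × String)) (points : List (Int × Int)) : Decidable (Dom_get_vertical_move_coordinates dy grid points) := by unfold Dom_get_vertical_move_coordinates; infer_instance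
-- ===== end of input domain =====

-- B replaces A's level-by-level frontier recursion by a worklist BFS (one queue of cells, a
-- visited set, each cell expanded at most once); return-value equivalence, no mutation involved.

-- ===== PORT A =====
-- the Python dict grid, flattened by the type convention to (x, y, v) triples, as an association dict keyed by (x, y)
def pvGridDict (grid : List (Int × Int × String)) : PySem.Dict (Int × Int) String :=
  PySem.Dict.ofList (grid.map (fun e => ((e.1, e.2.1), e.2.2)))

-- all(grid.get((x, y + dy)) == '.' for x, y in points)
def pvAllDots (dy : Int) (g : PySem.Dict (Int × Int) String) (pts : List (Int × Int)) : Bool :=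
  pts.all (fun p => g.get? (p.1, p.2 + dy) == some ".")

-- the 'for x, y in points' loop building next_row ('if (adj := grid.get(..)) == "[" … elif adj == "]" …')
def pvNextRow (dy : Int) (g : PySem.Dict (Int × Int) String) (pts : List (Int × Int)) : PySem.Set (Int × Int) :=
  pts.foldl (fun nr p =>
    let adj := g.get? (p.1, p.2 + dy)
    if adj == some "[" then
      PySem.Set.add (PySem.Set.add nr (p.1, p.2 + dy)) (p.1 + 1, p.2 + dy)
    else if adj == some "]" then
      PySem.Set.add (PySem.Set.add nr (p.1, p.2 + dy)) (p.1 - 1, p.2 + dy)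
    else nr) PySem.Set.empty

-- A's recursion; fuel only makes it total (inside Pre_ the frontier dies out long before the fuel does)
def pvRecA (dy : Int) (g : PySem.Dict (Int × Int) String) : Nat → PySem.Set (Int × Int) → PySem.Set (Int × Int)
  | 0, pts => pts
  | fuel + 1, pts =>
    if pvAllDots dy g pts then pts
    else PySem.Set.union pts (pvRecA dy g fuel (pvNextRow dy g pts))

def get_vertical_move_coordinates (dy : Int) (grid : List (Int × Int × String)) (points : List (Int × Int)) : List (Int × Int) :=
  pvRecA dy (pvGridDict grid) (points.length + 3 * grid.length + 1) (PySem.Set.ofList points)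

-- ===== PORT B =====
-- the 'while i < len(queue)' worklist loop of Source B; fuel only makes it total (one unit per queue
-- element examined; inside Pre_ the chosen fuel provably exceeds the number of queue entries)
def pvBfs (dy : Int) (g : PySem.Dict (Int × Int) String) : Nat → PySem.Set (Int × Int) → List (Int × Int) → PySem.Set (Int × Int)
  | 0, seen, _ => seen
  | _ + 1, seen, [] => seen
  | fuel + 1, seen, p :: rest =>
    if PySem.Set.contains seen p then pvBfs dy g fuel seen rest
    else
      let adj := g.get? (p.1, p.2 + dy)
      if adj == some "[" then
        pvBfs dy g fuel (PySem.Set.add seen p) (rest ++ [(p.1, p.2 + dy), (p.1 + 1, p.2 + dy)])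
      else if adj == some "]" then
        pvBfs dy g fuel (PySem.Set.add seen p) (rest ++ [(p.1, p.2 + dy), (p.1 - 1, p.2 + dy)])
      else pvBfs dy g fuel (PySem.Set.add seen p) rest

def get_vertical_move_coordinates_alt (dy : Int) (grid : List (Int × Int × String)) (points : List (Int × Int)) : List (Int × Int) :=
  pvBfs dy (PySem.Dict.ofList (grid.map (fun e => ((e.1, e.2.1), e.2.2))))
    (4 * points.length + 9 * grid.length + 1) PySem.Set.empty points

-- ===== PRECONDITION & SPEC =====
-- Pre_ excludes dy = 0, on which A's recursion can repeat the same frontier forever and die with RecursionError (whether it does depends on the grid's contents).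
def Pre_get_vertical_move_coordinates (dy : Int) (grid : List (Int × Int × String)) (points : List (Int × Int)) : Prop := dy ≠ 0
instance (dy : Int) (grid : List (Int × Int × String)) (points : List (Int × Int)) : Decidable (Pre_get_vertical_move_coordinates dy grid points) := by unfold Pre_get_vertical_move_coordinates; infer_instance

def pvWitness_get_vertical_move_coordinates : Int × (List (Int × Int × String)) × (List (Int × Int)) :=
  (1, [(0, 1, "["), (1, 1, "]"), (0, 2, ".")], [(0, 0)])

def Spec_get_vertical_move_coordinates (dy : Int) (grid : List (Int × Int × String)) (points : List (Int × Int)) (out : List (Int × Int)) : Prop := out = get_vertical_move_coordinates_alt dy grid points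
instance (dy : Int) (grid : List (Int × Int × String)) (points : List (Int × Int)) (out : List (Int × Int)) : Decidable (Spec_get_vertical_move_coordinates dy grid points out) := by unfold Spec_get_vertical_move_coordinates; infer_instance

-- ===== CLAIM (what is proved, stated in full; the proofs are below) =====
def Claim_equal_get_vertical_move_coordinates : Prop := ∀ (dy : Int) (grid : List (Int × Int × String)) (points : List (Int × Int)), Dom_get_vertical_move_coordinates dy grid points → Pre_get_vertical_move_coordinates dy grid points → Spec_get_vertical_move_coordinates dy grid points (get_vertical_move_coordinates dy grid points)

-- ===== LEMMAS AND PROOFS =====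

-- ---- generic PySem.Set.update algebra ----

-- s.update(b.add(x)) = s.update(b).add(x)
theorem pv_update_add {α : Type} [BEq α] [LawfulBEq α] (a b : List α) (x : α) :
    PySem.Set.update a (PySem.Set.add b x) = PySem.Set.add (PySem.Set.update a b) x := by
  by_cases hx : x ∈ b
  · rw [PySem.Set.add_of_mem hx, PySem.Set.add_of_mem]
    exact (PySem.Set.mem_update _ _ _).mpr (Or.inr hx)
  · rw [PySem.Set.add_of_not_mem hx, PySem.Set.update_append, PySem.Set.update_cons,
      PySem.Set.update_nil]

-- update is associative as a list operation
theorem pv_update_assoc {α : Type} [BEq α] [LawfulBEq α] (a b c : List α) :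
    PySem.Set.update (PySem.Set.update a b) c = PySem.Set.update a (PySem.Set.update b c) := by
  induction c generalizing b with
  | nil => simp [PySem.Set.update_nil]
  | cons x c ih => rw [PySem.Set.update_cons, PySem.Set.update_cons, ← pv_update_add, ih]

-- updating with already-present elements is the identity
theorem pv_update_eq_self {α : Type} [BEq α] [LawfulBEq α] (s l : List α)
    (h : ∀ x ∈ l, x ∈ s) : PySem.Set.update s l = s := by
  induction l generalizing s with
  | nil => rfl
  | cons x l ih =>
    rw [PySem.Set.update_cons, PySem.Set.add_of_mem (h x (by simp))]
    exact ih s (fun y hy => h y (by simp [hy]))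

theorem pv_mem_update_left {α : Type} [BEq α] [LawfulBEq α] {s : List α} (l : List α) {x : α}
    (h : x ∈ s) : x ∈ PySem.Set.update s l := (PySem.Set.mem_update _ _ _).mpr (Or.inl h)

theorem pv_mem_update_right {α : Type} [BEq α] [LawfulBEq α] (s : List α) {l : List α} {x : α}
    (h : x ∈ l) : x ∈ PySem.Set.update s l := (PySem.Set.mem_update _ _ _).mpr (Or.inr h)

-- ---- counting lemmas ----

theorem pv_filter_le {α : Type} (l : List α) (p q : α → Bool)
    (h : ∀ a ∈ l, p a = true → q a = true) :
    (l.filter p).length ≤ (l.filter q).length := by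
  induction l with
  | nil => simp
  | cons a l ih =>
    have ih' := ih (fun b hb => h b (by simp [hb]))
    by_cases hp : p a = true
    · simp [hp, h a (by simp) hp]; omega
    · simp only [List.filter_cons]
      rw [Bool.not_eq_true] at hp
      simp only [hp, Bool.false_eq_true, if_false]
      by_cases hq : q a = true <;> simp [hq] <;> omega

theorem pv_filter_lt {α : Type} (l : List α) (p q : α → Bool)
    (h : ∀ a ∈ l, p a = true → q a = true)
    (x : α) (hx : x ∈ l) (hq : q x = true) (hp : p x = false) :
    (l.filter p).length < (l.filter q).length := by
  induction l with
  | nil => simp at hx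
  | cons a l ih =>
    have hsub : ∀ b ∈ l, p b = true → q b = true := fun b hb => h b (by simp [hb])
    rcases List.mem_cons.mp hx with rfl | hx'
    · have hle := pv_filter_le l p q hsub
      simp [hp, hq]; omega
    · have hlt := ih hsub hx'
      by_cases hpa : p a = true
      · simp [hpa, h a (by simp) hpa]; omega
      · rw [Bool.not_eq_true] at hpa
        simp only [List.filter_cons, hpa, Bool.false_eq_true, if_false]
        by_cases hqa : q a = true <;> simp [hqa] <;> omega


-- ---- the cells a single point pushes (proof-side view of both ports' branch logic) ----

def pvKids (dy : Int) (g : PySem.Dict (Int × Int) String) (p : Int × Int) : List (Int × Int) :=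
  if g.get? (p.1, p.2 + dy) == some "[" then [(p.1, p.2 + dy), (p.1 + 1, p.2 + dy)]
  else if g.get? (p.1, p.2 + dy) == some "]" then [(p.1, p.2 + dy), (p.1 - 1, p.2 + dy)]
  else []

theorem pv_kids_len (dy : Int) (g : PySem.Dict (Int × Int) String) (p : Int × Int) :
    (pvKids dy g p).length ≤ 2 := by
  unfold pvKids; split_ifs <;> simp

theorem pv_kids_y (dy : Int) (g : PySem.Dict (Int × Int) String) (p x : Int × Int)
    (hx : x ∈ pvKids dy g p) : x.2 = p.2 + dy := by
  unfold pvKids at hx; split_ifs at hx <;> simp at hx <;> rcases hx with h | h <;>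
    rw [h]

theorem pv_allDots_kids (dy : Int) (g : PySem.Dict (Int × Int) String)
    {fr : List (Int × Int)} (h : pvAllDots dy g fr = true) {p : Int × Int} (hp : p ∈ fr) :
    pvKids dy g p = [] := by
  have hd := List.all_eq_true.mp h p hp
  have : g.get? (p.1, p.2 + dy) = some "." := eq_of_beq hd
  unfold pvKids
  simp [this]

-- pvNextRow is exactly 'dedup the concatenation of all kids'
theorem pv_nextRow_eq (dy : Int) (g : PySem.Dict (Int × Int) String) (pts : List (Int × Int)) :
    pvNextRow dy g pts = PySem.Set.update [] (pts.flatMap (pvKids dy g)) := by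
  show pts.foldl _ PySem.Set.empty = _
  have step : ∀ (l : List (Int × Int)) (acc : PySem.Set (Int × Int)),
      l.foldl (fun nr p =>
        let adj := g.get? (p.1, p.2 + dy)
        if adj == some "[" then
          PySem.Set.add (PySem.Set.add nr (p.1, p.2 + dy)) (p.1 + 1, p.2 + dy)
        else if adj == some "]" then
          PySem.Set.add (PySem.Set.add nr (p.1, p.2 + dy)) (p.1 - 1, p.2 + dy)
        else nr) acc = PySem.Set.update acc (l.flatMap (pvKids dy g)) := by
    intro l
    induction l with
    | nil => intro acc; rfl
    | cons p l ih =>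
      intro acc
      rw [List.foldl_cons, List.flatMap_cons, PySem.Set.update_append, ih]
      congr 1
      by_cases h1 : (g.get? (p.1, p.2 + dy) == some "[") = true
      · simp only [pvKids, h1, if_true]; rfl
      · by_cases h2 : (g.get? (p.1, p.2 + dy) == some "]") = true
        · simp only [pvKids, h1, h2, if_true, if_false, Bool.false_eq_true]; rfl
        · simp only [pvKids, h1, h2, if_false, Bool.false_eq_true]; rfl
  exact step pts _

-- the kids enqueued by the BFS loop while scanning q (only new points contribute)
def pvNewKids (dy : Int) (g : PySem.Dict (Int × Int) String) :
    PySem.Set (Int × Int) → List (Int × Int) → List (Int × Int)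
  | _, [] => []
  | seen, p :: q =>
    if PySem.Set.contains seen p then pvNewKids dy g seen q
    else pvKids dy g p ++ pvNewKids dy g (PySem.Set.add seen p) q

theorem pv_newKids_nil (dy : Int) (g : PySem.Dict (Int × Int) String) :
    ∀ (q : List (Int × Int)) (seen : PySem.Set (Int × Int)),
      (∀ p ∈ q, p ∉ seen → pvKids dy g p = []) → pvNewKids dy g seen q = [] := by
  intro q
  induction q with
  | nil => intro seen _; rfl
  | cons p q ih =>
    intro seen h
    unfold pvNewKids
    by_cases hp : PySem.Set.contains seen p
    · rw [if_pos hp]; exact ih seen (fun r hr => h r (by simp [hr]))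
    · rw [if_neg hp]
      have hpk : pvKids dy g p = [] :=
        h p (by simp) (fun hmem => hp ((PySem.Set.contains_iff _ _).mpr hmem))
      rw [hpk, List.nil_append]
      refine ih _ (fun r hr hrs => h r (by simp [hr]) ?_)
      intro hmem
      exact hrs ((PySem.Set.mem_add _ _ _).mpr (Or.inl hmem))

theorem pv_newKids_len (dy : Int) (g : PySem.Dict (Int × Int) String) :
    ∀ (q : List (Int × Int)) (seen : PySem.Set (Int × Int)),
      (pvNewKids dy g seen q).length ≤
        2 * ((PySem.Set.update seen q).length - seen.length) := by
  intro q
  induction q with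
  | nil => intro seen; simp [pvNewKids, PySem.Set.update_nil]
  | cons p q ih =>
    intro seen
    rw [PySem.Set.update_cons]
    unfold pvNewKids
    by_cases hp : PySem.Set.contains seen p
    · rw [if_pos hp]
      have : PySem.Set.add seen p = seen :=
        PySem.Set.add_of_mem ((PySem.Set.contains_iff _ _).mp hp)
      rw [this]
      exact ih seen
    · rw [if_neg hp]
      have hnm : p ∉ seen := fun hmem => hp ((PySem.Set.contains_iff _ _).mpr hmem)
      have hadd : PySem.Set.add seen p = seen ++ [p] := PySem.Set.add_of_not_mem hnm
      have h1 := ih (PySem.Set.add seen p)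
      have h2 : (pvKids dy g p).length ≤ 2 := pv_kids_len dy g p
      have hlen : (PySem.Set.add seen p).length = seen.length + 1 := by
        rw [hadd]; simp
      have h3 : seen.length + 1 ≤ (PySem.Set.update (PySem.Set.add seen p) q).length := by
        rw [PySem.Set.update_eq_append_filter, List.length_append, hlen]; omega
      rw [List.length_append]
      rw [hlen] at h1
      omega


-- ---- BFS loop shape ----

theorem pv_bfs_nil (dy : Int) (g : PySem.Dict (Int × Int) String) (f : Nat)
    (seen : PySem.Set (Int × Int)) : pvBfs dy g f seen [] = seen := by
  cases f <;> rfl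

-- one BFS step on a fresh head enqueues exactly its kids
theorem pv_bfs_step (dy : Int) (g : PySem.Dict (Int × Int) String) (f : Nat)
    (seen : PySem.Set (Int × Int)) (p : Int × Int) (rest : List (Int × Int))
    (hp : ¬ PySem.Set.contains seen p = true) :
    pvBfs dy g (f + 1) seen (p :: rest) =
      pvBfs dy g f (PySem.Set.add seen p) (rest ++ pvKids dy g p) := by
  show (if PySem.Set.contains seen p then _ else _) = _
  rw [if_neg hp]
  by_cases h1 : (g.get? (p.1, p.2 + dy) == some "[") = true
  · simp only [pvKids, h1, if_true]
  · by_cases h2 : (g.get? (p.1, p.2 + dy) == some "]") = true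
    · simp only [pvKids, h1, h2, if_true, if_false, Bool.false_eq_true]
    · simp only [pvKids, h1, h2, if_false, Bool.false_eq_true, List.append_nil]

-- scanning a whole prefix q1 of the queue in one batch
theorem pv_bfs_batch (dy : Int) (g : PySem.Dict (Int × Int) String) :
    ∀ (q1 q2 : List (Int × Int)) (seen : PySem.Set (Int × Int)) (f : Nat),
      q1.length ≤ f →
      pvBfs dy g f seen (q1 ++ q2) =
        pvBfs dy g (f - q1.length) (PySem.Set.update seen q1)
          (q2 ++ pvNewKids dy g seen q1) := by
  intro q1
  induction q1 with
  | nil => intro q2 seen f _; simp [pvNewKids, PySem.Set.update_nil]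
  | cons p q1 ih =>
    intro q2 seen f hf
    obtain ⟨f', rfl⟩ : ∃ f', f = f' + 1 := by
      cases f with
      | zero => simp at hf
      | succ f' => exact ⟨f', rfl⟩
    have hf' : q1.length ≤ f' := by simp at hf; omega
    by_cases hp : PySem.Set.contains seen p = true
    · have hmem : p ∈ seen := (PySem.Set.contains_iff _ _).mp hp
      have h1 : pvBfs dy g (f' + 1) seen ((p :: q1) ++ q2) = pvBfs dy g f' seen (q1 ++ q2) := by
        show (if PySem.Set.contains seen p then _ else _) = _
        rw [if_pos hp]
        rfl
      have h2 : pvNewKids dy g seen (p :: q1) = pvNewKids dy g seen q1 := by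
        show (if PySem.Set.contains seen p then _ else _) = _
        rw [if_pos hp]
      rw [h1, ih q2 seen f' hf', PySem.Set.update_cons, PySem.Set.add_of_mem hmem, h2]
      have hlen : f' + 1 - (p :: q1).length = f' - q1.length := by
        simp only [List.length_cons]; omega
      rw [hlen]
    · have h1 : pvBfs dy g (f' + 1) seen ((p :: q1) ++ q2) =
          pvBfs dy g f' (PySem.Set.add seen p) ((q1 ++ q2) ++ pvKids dy g p) :=
        pv_bfs_step dy g f' seen p (q1 ++ q2) hp
      have h2 : pvNewKids dy g seen (p :: q1) =
          pvKids dy g p ++ pvNewKids dy g (PySem.Set.add seen p) q1 := by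
        show (if PySem.Set.contains seen p then _ else _) = _
        rw [if_neg hp]
      rw [h1, List.append_assoc, ih (q2 ++ pvKids dy g p) (PySem.Set.add seen p) f' hf',
        PySem.Set.update_cons, h2]
      rw [List.append_assoc]
      -- reorder q2 ++ kids p ++ newKids vs kids p ++ newKids appended after q2
      have h3 : q2 ++ (pvKids dy g p ++ pvNewKids dy g (PySem.Set.add seen p) q1) =
          (q2 ++ pvKids dy g p) ++ pvNewKids dy g (PySem.Set.add seen p) q1 := by
        rw [List.append_assoc]
      rw [h3]
      have hlen : f' + 1 - (p :: q1).length = f' - q1.length := by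
        simp only [List.length_cons]; omega
      rw [hlen]

-- ---- absorbing duplicate / already-seen expansion work ----

-- expanding a deduplicated-through-t stream gives the same update, once t's kids are present
theorem pv_kl (dy : Int) (g : PySem.Dict (Int × Int) String) :
    ∀ (l t X : List (Int × Int)),
      (∀ p ∈ t, ∀ x ∈ pvKids dy g p, x ∈ X) →
      PySem.Set.update X (l.flatMap (pvKids dy g)) =
        PySem.Set.update X ((PySem.Set.update t l).flatMap (pvKids dy g)) := by
  intro l
  induction l with
  | nil =>
    intro t X h
    rw [PySem.Set.update_nil, List.flatMap_nil, PySem.Set.update_nil]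
    exact (pv_update_eq_self _ _ (fun x hx => by
      rcases List.mem_flatMap.mp hx with ⟨p, hp, hxp⟩
      exact h p hp x hxp)).symm
  | cons p l ih =>
    intro t X h
    rw [List.flatMap_cons, PySem.Set.update_append, PySem.Set.update_cons]
    by_cases hp : p ∈ t
    · rw [PySem.Set.add_of_mem hp,
        pv_update_eq_self X (pvKids dy g p) (fun x hx => h p hp x hx)]
      exact ih t X h
    · rw [PySem.Set.add_of_not_mem hp]
      have hcond : ∀ r ∈ t ++ [p], ∀ x ∈ pvKids dy g r,
          x ∈ PySem.Set.update X (pvKids dy g p) := by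
        intro r hr x hx
        rcases List.mem_append.mp hr with hr | hr
        · exact pv_mem_update_left _ (h r hr x hx)
        · simp at hr; subst hr; exact pv_mem_update_right _ hx
      rw [ih (t ++ [p]) (PySem.Set.update X (pvKids dy g p)) hcond]
      -- both sides absorb t's kids and then p's kids in front
      have htX : ∀ x ∈ List.flatMap (pvKids dy g) t, x ∈ X := by
        intro x hx
        rcases List.mem_flatMap.mp hx with ⟨r, hr, hxr⟩
        exact h r hr x hxr
      have hsplit : List.flatMap (pvKids dy g) (PySem.Set.update (t ++ [p]) l)
          = (List.flatMap (pvKids dy g) t ++ pvKids dy g p) ++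
            List.flatMap (pvKids dy g)
              ((PySem.Set.ofList l).filter (fun y => !(PySem.Set.contains (t ++ [p]) y))) := by
        rw [PySem.Set.update_eq_append_filter, List.flatMap_append, List.flatMap_append]
        simp
      have e1 : PySem.Set.update (PySem.Set.update X (pvKids dy g p))
          (List.flatMap (pvKids dy g) t) = PySem.Set.update X (pvKids dy g p) :=
        pv_update_eq_self _ _ (fun x hx => pv_mem_update_left _ (htX x hx))
      have e2 : PySem.Set.update (PySem.Set.update X (pvKids dy g p))
          (pvKids dy g p) = PySem.Set.update X (pvKids dy g p) :=
        pv_update_eq_self _ _ (fun x hx => pv_mem_update_right _ hx)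
      have e3 : PySem.Set.update X (List.flatMap (pvKids dy g) t) = X :=
        pv_update_eq_self _ _ htX
      rw [hsplit, PySem.Set.update_append, PySem.Set.update_append, e1, e2,
        PySem.Set.update_append, PySem.Set.update_append, e3]


-- the BFS enqueue stream equals the full expansion stream, up to absorbed duplicates
theorem pv_nc (dy : Int) (g : PySem.Dict (Int × Int) String) :
    ∀ (q : List (Int × Int)) (seen X : PySem.Set (Int × Int)),
      (∀ p ∈ seen, ∀ x ∈ pvKids dy g p, x ∈ X) →
      PySem.Set.update X (pvNewKids dy g seen q) =
        PySem.Set.update X (q.flatMap (pvKids dy g)) := by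
  intro q
  induction q with
  | nil => intro seen X _; rfl
  | cons p q ih =>
    intro seen X h
    rw [List.flatMap_cons, PySem.Set.update_append]
    by_cases hp : PySem.Set.contains seen p = true
    · have h1 : pvNewKids dy g seen (p :: q) = pvNewKids dy g seen q := by
        show (if PySem.Set.contains seen p then _ else _) = _
        rw [if_pos hp]
      have hmem : p ∈ seen := (PySem.Set.contains_iff _ _).mp hp
      rw [h1, pv_update_eq_self X (pvKids dy g p) (fun x hx => h p hmem x hx)]
      exact ih seen X h
    · have h1 : pvNewKids dy g seen (p :: q) =
          pvKids dy g p ++ pvNewKids dy g (PySem.Set.add seen p) q := by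
        show (if PySem.Set.contains seen p then _ else _) = _
        rw [if_neg hp]
      rw [h1, PySem.Set.update_append]
      refine ih (PySem.Set.add seen p) (PySem.Set.update X (pvKids dy g p)) ?_
      intro r hr x hx
      rcases (PySem.Set.mem_add _ _ _).mp hr with hr | rfl
      · exact pv_mem_update_left _ (h r hr x hx)
      · exact pv_mem_update_right _ hx

-- ---- counting fresh cells against a fixed candidate pool ----

theorem pv_n_drop {α : Type} [BEq α] [LawfulBEq α] (cand : List α) :
    ∀ (r seen : List α), (seen ++ r).Nodup → (∀ x ∈ r, x ∈ cand) →
      (cand.filter (fun c => !(PySem.Set.contains (seen ++ r) c))).length + r.length ≤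
        (cand.filter (fun c => !(PySem.Set.contains seen c))).length := by
  intro r
  induction r with
  | nil => intro seen _ _; simp
  | cons x r ih =>
    intro seen hnd hc
    have hx : x ∈ cand := hc x (by simp)
    have hdisj := (List.nodup_append.mp hnd).2.2
    have hxs : x ∉ seen := fun hmem => hdisj x hmem x (by simp) rfl
    have step1 : (cand.filter (fun c => !(PySem.Set.contains (seen ++ [x]) c))).length + 1 ≤
        (cand.filter (fun c => !(PySem.Set.contains seen c))).length := by
      refine pv_filter_lt cand _ _ ?_ x hx ?_ ?_
      · intro a _ ha
        rw [Bool.not_eq_true'] at ha ⊢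
        rw [Bool.eq_false_iff] at ha ⊢
        intro hcon
        exact ha ((PySem.Set.contains_iff _ _).mpr
          (List.mem_append.mpr (Or.inl ((PySem.Set.contains_iff _ _).mp hcon))))
      · rw [Bool.not_eq_true', Bool.eq_false_iff]
        intro hcon
        exact hxs ((PySem.Set.contains_iff _ _).mp hcon)
      · rw [Bool.not_eq_false']
        exact (PySem.Set.contains_iff _ _).mpr (by simp)
    have hassoc : seen ++ x :: r = (seen ++ [x]) ++ r := by simp
    have step2 := ih (seen ++ [x]) (by rw [← hassoc]; exact hnd)
      (fun y hy => hc y (by simp [hy]))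
    rw [hassoc, List.length_cons]
    omega


-- ---- termination measure for A's frontier recursion (dy ≠ 0 drives the frontier off the grid) ----

def pvSKey (dy : Int) (p : Int × Int) : Int := if 0 < dy then p.2 else -p.2

def pvM (dy : Int) (cand fr : List (Int × Int)) : Nat :=
  (cand.filter (fun c => fr.any (fun p => pvSKey dy p ≤ pvSKey dy c))).length

theorem pv_skey_kid (dy : Int) (g : PySem.Dict (Int × Int) String) (hdy : dy ≠ 0)
    (p x : Int × Int) (hx : x ∈ pvKids dy g p) : pvSKey dy p + 1 ≤ pvSKey dy x := by
  have hy := pv_kids_y dy g p x hx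
  unfold pvSKey
  split_ifs with h <;> omega

theorem pv_ex_min (dy : Int) :
    ∀ (l : List (Int × Int)), l ≠ [] → ∃ p ∈ l, ∀ q ∈ l, pvSKey dy p ≤ pvSKey dy q := by
  intro l
  induction l with
  | nil => intro h; exact absurd rfl h
  | cons a l ih =>
    intro _
    rcases l with _ | ⟨b, l'⟩
    · exact ⟨a, by simp, by simp⟩
    · obtain ⟨c, hc, hcmin⟩ := ih (by simp)
      by_cases hac : pvSKey dy a ≤ pvSKey dy c
      · refine ⟨a, by simp, ?_⟩
        intro q hq
        rcases List.mem_cons.mp hq with rfl | hq'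
        · exact le_refl _
        · exact le_trans hac (hcmin q hq')
      · refine ⟨c, by simp [hc], ?_⟩
        intro q hq
        rcases List.mem_cons.mp hq with rfl | hq'
        · omega
        · exact hcmin q hq'

theorem pv_m_le (dy : Int) (cand fr : List (Int × Int)) : pvM dy cand fr ≤ cand.length :=
  List.length_filter_le _ _

theorem pv_mem_nextRow (dy : Int) (g : PySem.Dict (Int × Int) String)
    (fr : List (Int × Int)) {x : Int × Int} (hx : x ∈ pvNextRow dy g fr) :
    ∃ p ∈ fr, x ∈ pvKids dy g p := by
  rw [pv_nextRow_eq] at hx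
  rcases (PySem.Set.mem_update _ _ _).mp hx with h | h
  · simp at h
  · exact List.mem_flatMap.mp h

theorem pv_m_dec (dy : Int) (g : PySem.Dict (Int × Int) String) (cand : List (Int × Int))
    (hdy : dy ≠ 0) (fr : List (Int × Int)) (hfr : fr ≠ [])
    (hsub : ∀ x ∈ fr, x ∈ cand) :
    pvM dy cand (pvNextRow dy g fr) < pvM dy cand fr := by
  obtain ⟨p0, hp0, hmin⟩ := pv_ex_min dy fr hfr
  refine pv_filter_lt cand _ _ ?_ p0 (hsub p0 hp0) ?_ ?_
  · intro c _ hc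
    obtain ⟨p', hp', hle⟩ := List.any_eq_true.mp hc
    obtain ⟨p, hp, hkid⟩ := pv_mem_nextRow dy g fr hp'
    have h1 := pv_skey_kid dy g hdy p p' hkid
    have h2 : pvSKey dy p' ≤ pvSKey dy c := of_decide_eq_true hle
    exact List.any_eq_true.mpr ⟨p, hp, decide_eq_true (by omega)⟩
  · exact List.any_eq_true.mpr ⟨p0, hp0, by simp⟩
  · rw [List.any_eq_false]
    intro p' hp'
    obtain ⟨p, hp, hkid⟩ := pv_mem_nextRow dy g fr hp'
    have h1 := pv_skey_kid dy g hdy p p' hkid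
    have h2 := hmin p hp
    simp only [decide_eq_true_eq]
    omega

-- ---- small facts about A's recursion ----

theorem pv_recA_nil (dy : Int) (g : PySem.Dict (Int × Int) String) :
    ∀ f : Nat, pvRecA dy g f [] = [] := by
  intro f
  cases f with
  | zero => rfl
  | succ n => simp [pvRecA, pvAllDots]

-- A's recursion keeps its set duplicate-free
theorem pv_rec_nodup (dy : Int) (g : PySem.Dict (Int × Int) String) :
    ∀ (fuel : Nat) (pts : PySem.Set (Int × Int)), pts.Nodup → (pvRecA dy g fuel pts).Nodup := by
  intro fuel
  induction fuel with
  | zero => intro pts h; exact h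
  | succ n ih =>
    intro pts h
    simp only [pvRecA]
    by_cases hd : pvAllDots dy g pts
    · simpa [hd]
    · simp only [hd, if_false, Bool.false_eq_true]
      exact PySem.Set.nodup_union _ _ h


-- ---- the bridge: BFS from (seen, queue) computes seen updated with A's recursion from the frontier ----

theorem pv_master (dy : Int) (g : PySem.Dict (Int × Int) String) (cand : List (Int × Int))
    (hdy : dy ≠ 0)
    (hkc : ∀ p x, x ∈ pvKids dy g p → x ∈ cand) :
    ∀ (f : Nat) (seen q fr : List (Int × Int)),
      seen.Nodup → fr.Nodup → (∀ x ∈ fr, x ∈ cand) →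
      PySem.Set.update seen q = PySem.Set.update seen fr →
      (∀ p ∈ seen, ∀ x ∈ pvKids dy g p, x ∈ PySem.Set.update seen fr) →
      pvM dy cand fr < f →
      ∀ gl : Nat,
        q.length + 3 * (cand.filter (fun c => !(PySem.Set.contains seen c))).length ≤ gl →
        pvBfs dy g gl seen q = PySem.Set.update seen (pvRecA dy g f fr) := by
  intro f
  induction f with
  | zero =>
    intro seen q fr _ _ _ _ _ hm
    exact absurd hm (Nat.not_lt_zero _)
  | succ n ih =>
    intro seen q fr hns hnf hfc hq hcl hm gl hgl
    have hql : q.length ≤ gl := by omega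
    have hbatch := pv_bfs_batch dy g q [] seen gl hql
    rw [List.append_nil] at hbatch
    rw [List.nil_append] at hbatch
    by_cases hfr : fr = []
    · subst hfr
      rw [pv_recA_nil, PySem.Set.update_nil]
      rw [PySem.Set.update_nil] at hq
      have hnk : pvNewKids dy g seen q = [] := by
        apply pv_newKids_nil
        intro p hp hps
        exfalso
        have hmem : p ∈ PySem.Set.update seen q := pv_mem_update_right _ hp
        rw [hq] at hmem
        exact hps hmem
      rw [hbatch, hq, hnk, pv_bfs_nil]
    · by_cases hdots : pvAllDots dy g fr = true
      · have hrec : pvRecA dy g (n + 1) fr = fr := by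
          simp [pvRecA, hdots]
        rw [hrec]
        have hnk : pvNewKids dy g seen q = [] := by
          apply pv_newKids_nil
          intro p hp hps
          have hmem : p ∈ PySem.Set.update seen fr := by
            rw [← hq]; exact pv_mem_update_right _ hp
          rcases (PySem.Set.mem_update _ _ _).mp hmem with h | h
          · exact absurd h hps
          · exact pv_allDots_kids dy g hdots h
        rw [hbatch, hq, hnk, pv_bfs_nil]
      · -- main step
        have hrec : pvRecA dy g (n + 1) fr =
            PySem.Set.update fr (pvRecA dy g n (pvNextRow dy g fr)) := by
          simp only [pvRecA, hdots, Bool.false_eq_true, if_false]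
          rfl
        have hclS : ∀ p ∈ seen, ∀ x ∈ pvKids dy g p, x ∈ PySem.Set.update seen fr := hcl
        -- queue after the batch expands to the same set as the next frontier
        have hq' : PySem.Set.update (PySem.Set.update seen fr) (pvNewKids dy g seen q) =
            PySem.Set.update (PySem.Set.update seen fr) (pvNextRow dy g fr) := by
          rw [pv_nc dy g q seen _ hclS, pv_kl dy g q seen _ hclS, hq,
            ← pv_kl dy g fr seen _ hclS, pv_nextRow_eq, ← pv_update_assoc,
            PySem.Set.update_nil]
        have hnsS : (PySem.Set.update seen fr).Nodup := PySem.Set.nodup_update _ _ hns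
        have hnf' : (pvNextRow dy g fr).Nodup := by
          rw [pv_nextRow_eq]
          exact PySem.Set.nodup_update _ _ List.nodup_nil
        have hfc' : ∀ x ∈ pvNextRow dy g fr, x ∈ cand := by
          intro x hx
          obtain ⟨p, _, hk⟩ := pv_mem_nextRow dy g fr hx
          exact hkc p x hk
        have hcl' : ∀ p ∈ PySem.Set.update seen fr, ∀ x ∈ pvKids dy g p,
            x ∈ PySem.Set.update (PySem.Set.update seen fr) (pvNextRow dy g fr) := by
          intro p hp x hx
          rcases (PySem.Set.mem_update _ _ _).mp hp with h | h
          · exact pv_mem_update_left _ (hclS p h x hx)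
          · refine pv_mem_update_right _ ?_
            rw [pv_nextRow_eq]
            exact pv_mem_update_right _ (List.mem_flatMap.mpr ⟨p, h, hx⟩)
        have hm' : pvM dy cand (pvNextRow dy g fr) < n := by
          have h1 := pv_m_dec dy g cand hdy fr hfr hfc
          omega
        -- fuel accounting
        have hrest := PySem.Set.update_eq_append_filter seen q
        have hrc : ∀ x ∈ (PySem.Set.ofList q).filter (fun y => !(PySem.Set.contains seen y)),
            x ∈ cand := by
          intro x hx
          have hxq : x ∈ q := (PySem.Set.mem_ofList _ _).mp (List.mem_filter.mp hx).1
          have hxns : x ∉ seen := by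
            have h2 := (List.mem_filter.mp hx).2
            rw [Bool.not_eq_true'] at h2
            rw [Bool.eq_false_iff] at h2
            exact fun hmem => h2 ((PySem.Set.contains_iff _ _).mpr hmem)
          have hmem : x ∈ PySem.Set.update seen fr := by
            rw [← hq]; exact pv_mem_update_right _ hxq
          rcases (PySem.Set.mem_update _ _ _).mp hmem with h | h
          · exact absurd h hxns
          · exact hfc x h
        have hndr : (seen ++ (PySem.Set.ofList q).filter
            (fun y => !(PySem.Set.contains seen y))).Nodup := by
          rw [← hrest, hq]
          exact hnsS
        have hcount := pv_n_drop cand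
          ((PySem.Set.ofList q).filter (fun y => !(PySem.Set.contains seen y))) seen hndr hrc
        have hqk := pv_newKids_len dy g q seen
        have hlen : (PySem.Set.update seen q).length =
            seen.length + ((PySem.Set.ofList q).filter
              (fun y => !(PySem.Set.contains seen y))).length := by
          rw [hrest, List.length_append]
        have hSeq : PySem.Set.update seen fr = seen ++ (PySem.Set.ofList q).filter
            (fun y => !(PySem.Set.contains seen y)) := by
          rw [← hq, hrest]
        have hfuel : (pvNewKids dy g seen q).length +
            3 * (cand.filter (fun c => !(PySem.Set.contains (PySem.Set.update seen fr) c))).length ≤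
            gl - q.length := by
          rw [hSeq]
          rw [hlen] at hqk
          omega
        have happ := ih (PySem.Set.update seen fr) (pvNewKids dy g seen q)
          (pvNextRow dy g fr) hnsS hnf' hfc' hq' hcl' hm' (gl - q.length) hfuel
        rw [hbatch, hq, happ, hrec, ← pv_update_assoc]


-- ---- the candidate pool for a concrete grid ----

theorem pv_key_mem (grid : List (Int × Int × String)) (k : Int × Int) (v : String)
    (h : (pvGridDict grid).get? k = some v) :
    k ∈ (grid.map (fun e => ((e.1, e.2.1), e.2.2))).map (·.1) := by
  have base : ∀ (l : List ((Int × Int) × String)), (PySem.Dict.ofList l).keys =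
      PySem.Set.update (PySem.Dict.empty : PySem.Dict (Int × Int) String).keys (l.map (·.1)) :=
    fun l => PySem.Dict.keys_foldl_insert_key l (fun x => x.1) (fun _ x => x.2) PySem.Dict.empty
  have hkeys : (pvGridDict grid).keys =
      PySem.Set.update (PySem.Dict.empty : PySem.Dict (Int × Int) String).keys
        ((grid.map (fun e => ((e.1, e.2.1), e.2.2))).map (·.1)) :=
    by unfold pvGridDict; exact base _
  have hk : k ∈ (pvGridDict grid).keys := by
    by_contra hk
    have h0 := (PySem.Dict.get?_eq_none_iff_not_mem_keys _ _).mpr hk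
    rw [h] at h0
    simp at h0
  rw [hkeys] at hk
  rcases (PySem.Set.mem_update _ _ _).mp hk with h | h
  · simp [PySem.Dict.keys_empty] at h
  · exact h

-- every pushed cell lies in the candidate pool derived from the grid
theorem pv_kids_sub (dy : Int) (grid : List (Int × Int × String))
    (points : List (Int × Int)) (p x : Int × Int)
    (hx : x ∈ pvKids dy (pvGridDict grid) p) :
    x ∈ points ++ grid.flatMap (fun e => [(e.1, e.2.1), (e.1 + 1, e.2.1), (e.1 - 1, e.2.1)]) := by
  unfold pvKids at hx
  split_ifs at hx with h1 h2
  · have hk := pv_key_mem grid (p.1, p.2 + dy) "[" (eq_of_beq h1)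
    rw [List.map_map] at hk
    obtain ⟨e, he, hek⟩ := List.mem_map.mp hk
    simp only [Function.comp_apply, Prod.mk.injEq] at hek
    refine List.mem_append.mpr (Or.inr (List.mem_flatMap.mpr ⟨e, he, ?_⟩))
    simp only [List.mem_cons, List.not_mem_nil, or_false] at hx ⊢
    rcases hx with rfl | rfl
    · exact Or.inl (by rw [hek.1, hek.2])
    · exact Or.inr (Or.inl (by rw [hek.1, hek.2]))
  · have hk := pv_key_mem grid (p.1, p.2 + dy) "]" (eq_of_beq h2)
    rw [List.map_map] at hk
    obtain ⟨e, he, hek⟩ := List.mem_map.mp hk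
    simp only [Function.comp_apply, Prod.mk.injEq] at hek
    refine List.mem_append.mpr (Or.inr (List.mem_flatMap.mpr ⟨e, he, ?_⟩))
    simp only [List.mem_cons, List.not_mem_nil, or_false] at hx ⊢
    rcases hx with rfl | rfl
    · exact Or.inl (by rw [hek.1, hek.2])
    · exact Or.inr (Or.inr (by rw [hek.1, hek.2]))
  · simp at hx

theorem pv_flat3_len (grid : List (Int × Int × String)) :
    (grid.flatMap (fun e => [(e.1, e.2.1), (e.1 + 1, e.2.1), (e.1 - 1, e.2.1)])).length =
      3 * grid.length := by
  induction grid with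
  | nil => rfl
  | cons e grid ih => simp [List.flatMap_cons, ih]; omega

-- ===== VERDICT (by name: the statement is the Claim_ definition above) =====
theorem get_vertical_move_coordinates_spec : Claim_equal_get_vertical_move_coordinates := by
  intro dy grid points _ hpre
  show _ = _
  unfold get_vertical_move_coordinates get_vertical_move_coordinates_alt
  have hmaster := pv_master dy (pvGridDict grid)
    (points ++ grid.flatMap (fun e => [(e.1, e.2.1), (e.1 + 1, e.2.1), (e.1 - 1, e.2.1)]))
    hpre
    (fun p x hx => pv_kids_sub dy grid points p x hx)
    (points.length + 3 * grid.length + 1)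
    [] points (PySem.Set.ofList points)
    List.nodup_nil
    (PySem.Set.nodup_ofList points)
    (fun x hx => List.mem_append.mpr (Or.inl ((PySem.Set.mem_ofList _ _).mp hx)))
    (by rw [PySem.Set.update_nil_left, PySem.Set.update_nil_left, PySem.Set.ofList_ofList])
    (by intro p hp; simp at hp)
    (by
      have h1 := pv_m_le dy
        (points ++ grid.flatMap (fun e => [(e.1, e.2.1), (e.1 + 1, e.2.1), (e.1 - 1, e.2.1)]))
        (PySem.Set.ofList points)
      rw [List.length_append, pv_flat3_len] at h1
      omega)
    (4 * points.length + 9 * grid.length + 1)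
    (by
      have hfilt : (List.filter (fun c => !PySem.Set.contains ([] : List (Int × Int)) c)
          (points ++ grid.flatMap (fun e => [(e.1, e.2.1), (e.1 + 1, e.2.1), (e.1 - 1, e.2.1)]))) =
          points ++ grid.flatMap (fun e => [(e.1, e.2.1), (e.1 + 1, e.2.1), (e.1 - 1, e.2.1)]) := by
        apply List.filter_eq_self.mpr
        intro a _
        rfl
      rw [hfilt, List.length_append, pv_flat3_len]
      omega)
  have hdicts : PySem.Dict.ofList (grid.map (fun e => ((e.1, e.2.1), e.2.2))) = pvGridDict grid := rfl
  rw [hdicts]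
  show pvRecA dy (pvGridDict grid) (points.length + 3 * grid.length + 1) (PySem.Set.ofList points) =
    pvBfs dy (pvGridDict grid) (4 * points.length + 9 * grid.length + 1) [] points
  rw [hmaster, PySem.Set.update_nil_left]
  exact (PySem.Set.ofList_eq_self_of_nodup _
    (pv_rec_nodup dy (pvGridDict grid) _ _ (PySem.Set.nodup_ofList points))).symm
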